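-- pv_equiv track=rewrite | github.com/HeadyZhang/bv-rag | chunker/regulation_chunker.py | _shorten_breadcrumb
-- ===== SOURCE A (Python) =====
-- def _shorten_breadcrumb(breadcrumb: str, document: str) -> str:
--     if "---" in breadcrumb:
--         content = breadcrumb.split("---")[-1].strip()
--     else:
--         content = breadcrumb
--     segments = [s.strip() for s in content.split("-") if s.strip()]
--     relevant = []
--     found_doc = False
--     for seg in segments:
--         if document and document.upper() in seg.upper():
--             found_doc = True
--         if found_doc:
--             relevant.append(seg)
--     if relevant:
--         return " > ".join(relevant)
--     return " > ".join(segments[-4:]) if len(segments) > 4 else " > ".join(segments)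
-- ===== SOURCE B (Python) =====
-- def _shorten_breadcrumb(breadcrumb: str, document: str) -> str:
--     if "---" in breadcrumb:
--         breadcrumb = breadcrumb.split("---")[-1].strip()
--     segments = [s.strip() for s in breadcrumb.split("-") if s.strip()]
--     relevant = _suffix_from_match(segments, document.upper()) if document else []
--     return " > ".join(relevant if relevant else segments[-4:])
--
-- def _suffix_from_match(segments, doc_upper):
--     if not segments:
--         return []
--     if doc_upper in segments[0].upper():
--         return segments
--     return _suffix_from_match(segments[1:], doc_upper)
-- ===== Notes on version B (the rewrite author's own statement) =====
-- stated objective: simpler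
-- what changed: Replaced the flag-and-accumulate loop by a recursive suffix-from-first-match helper (document uppercased once), and collapsed the two-branch fallback into a single segments[-4:] slice (equal to segments when len<=4) with one join.
import Mathlib
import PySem

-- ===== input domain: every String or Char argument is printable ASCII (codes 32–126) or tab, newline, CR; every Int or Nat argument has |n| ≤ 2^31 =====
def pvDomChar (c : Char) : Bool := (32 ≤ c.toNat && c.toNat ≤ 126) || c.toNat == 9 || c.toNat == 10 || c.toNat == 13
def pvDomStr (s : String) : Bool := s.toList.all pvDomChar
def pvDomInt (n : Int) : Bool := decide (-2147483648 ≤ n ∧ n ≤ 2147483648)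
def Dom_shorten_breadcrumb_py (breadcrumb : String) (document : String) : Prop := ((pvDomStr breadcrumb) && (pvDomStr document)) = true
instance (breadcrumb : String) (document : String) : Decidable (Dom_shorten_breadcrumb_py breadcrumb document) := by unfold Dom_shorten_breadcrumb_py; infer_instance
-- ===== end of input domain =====

-- B replaces A's flag-and-accumulate loop by a recursive suffix-from-first-match helper
-- and collapses the two-branch fallback into a single segments[-4:] (objective: simpler).

-- ===== PORT A =====
-- segments = [s.strip() for s in content.split("-") if s.strip()]  (strip is idempotent, so test after map)
def pvSegments (breadcrumb : String) : List String :=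
  let content :=
    if PySem.Str.isIn "---" breadcrumb then
      PySem.Str.strip (((PySem.Str.split? breadcrumb "---").getD []).getLastD "")
    else breadcrumb
  (((PySem.Str.split? content "-").getD []).map PySem.Str.strip).filter (fun t => t ≠ "")

-- the body of A's for-loop, state = (relevant, found_doc)
def pvStep (document : String) (st : List String × Bool) (seg : String) : List String × Bool :=
  let found := if document ≠ "" && PySem.Str.isIn (PySem.Str.upper document) (PySem.Str.upper seg)
               then true else st.2
  (if found then st.1 ++ [seg] else st.1, found)

def shorten_breadcrumb_py (breadcrumb : String) (document : String) : String :=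
  let segments := pvSegments breadcrumb
  let st := segments.foldl (pvStep document) ([], false)
  if st.1 ≠ [] then PySem.Str.join " > " st.1
  else if segments.length > 4 then PySem.Str.join " > " (PySem.List.slice segments (some (-4)) none)
  else PySem.Str.join " > " segments

-- ===== PORT B =====
def pvSuffixFromMatch (segments : List String) (docUpper : String) : List String :=
  match segments with
  | [] => []
  | s :: rest =>
    if PySem.Str.isIn docUpper (PySem.Str.upper s) then s :: rest
    else pvSuffixFromMatch rest docUpper

def shorten_breadcrumb_py_alt (breadcrumb : String) (document : String) : String :=
  let segments := pvSegments breadcrumb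
  let relevant := if document ≠ "" then pvSuffixFromMatch segments (PySem.Str.upper document) else []
  PySem.Str.join " > " (if relevant ≠ [] then relevant else PySem.List.slice segments (some (-4)) none)

-- ===== PRECONDITION & SPEC =====
def Spec_shorten_breadcrumb_py (breadcrumb : String) (document : String) (out : String) : Prop := out = shorten_breadcrumb_py_alt breadcrumb document
instance (breadcrumb : String) (document : String) (out : String) : Decidable (Spec_shorten_breadcrumb_py breadcrumb document out) := by unfold Spec_shorten_breadcrumb_py; infer_instance

-- ===== CLAIM =====
def Claim_equal_shorten_breadcrumb_py : Prop := ∀ (breadcrumb : String) (document : String), Dom_shorten_breadcrumb_py breadcrumb document → Spec_shorten_breadcrumb_py breadcrumb document (shorten_breadcrumb_py breadcrumb document)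

-- ===== LEMMAS AND PROOFS =====

-- once found_doc is true, the loop appends every remaining segment
theorem pvFoldl_true (document : String) (l : List String) (acc : List String) :
    l.foldl (pvStep document) (acc, true) = (acc ++ l, true) := by
  induction l generalizing acc with
  | nil => simp
  | cons x t ih => simp [pvStep, ih]

-- with an empty document the loop never fires
theorem pvFoldl_empty_doc (l : List String) (acc : List String) :
    l.foldl (pvStep "") (acc, false) = (acc, false) := by
  induction l with
  | nil => simp
  | cons x t ih => simpa [pvStep] using ih

-- A's loop from a not-yet-found state appends exactly B's suffix-from-first-match
theorem pvFoldl_false (document : String) (hd : document ≠ "") (l : List String) (acc : List String) :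
    l.foldl (pvStep document) (acc, false) =
      (acc ++ pvSuffixFromMatch l (PySem.Str.upper document),
       decide (pvSuffixFromMatch l (PySem.Str.upper document) ≠ [])) := by
  induction l generalizing acc with
  | nil => simp [pvSuffixFromMatch]
  | cons x t ih =>
    simp only [List.foldl_cons, pvStep, pvSuffixFromMatch]
    by_cases h : PySem.Chars.isIn (PySem.Chars.upper document.toList) (PySem.Chars.upper x.toList) = true
    · simp [hd, h, pvFoldl_true]
    · simp [hd, h, ih acc]

-- segments[-4:] equals A's two-branch fallback
theorem pvSlice_neg4 (l : List String) :
    PySem.List.slice l (some (-4)) none = if l.length > 4 then l.drop (l.length - 4) else l := by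
  rw [PySem.List.slice_from_neg_ofNat l 4 (by omega)]
  split_ifs with h
  · rfl
  · have : l.length - 4 = 0 := by omega
    simp [this]

-- ===== VERDICT =====
theorem shorten_breadcrumb_py_spec : Claim_equal_shorten_breadcrumb_py := by
  intro breadcrumb document _
  unfold Spec_shorten_breadcrumb_py shorten_breadcrumb_py shorten_breadcrumb_py_alt
  by_cases hd : document = ""
  · subst hd
    simp only [pvFoldl_empty_doc, pvSlice_neg4]
    split_ifs with h <;> simp_all
  · simp only [pvFoldl_false document hd]
    simp only [List.nil_append, hd, ne_eq, not_false_eq_true, if_true]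
    by_cases hr : pvSuffixFromMatch (pvSegments breadcrumb) (PySem.Str.upper document) = []
    · simp only [hr, pvSlice_neg4]
      split_ifs with h <;> simp_all
    · simp [hr]
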